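-- pv_equiv track=rewrite | github.com/olcayay/shopify-tracker | files/salesforce/sample-python-scripts/salesforce_category_listing.py | _pick_logo_url
-- ===== SOURCE A (Python) =====
-- from typing import Any, Dict, List, Optional
--
-- def _pick_logo_url(logos: Any) -> Optional[str]:
--     if not logos or not isinstance(logos, list):
--         return None
--     for preferred in ("Logo", "Big Logo"):
--         for entry in logos:
--             if isinstance(entry, dict) and entry.get("logoType") == preferred and entry.get("mediaId"):
--                 return str(entry["mediaId"]).strip()
--     if logos and isinstance(logos[0], dict) and logos[0].get("mediaId"):
--         return str(logos[0]["mediaId"]).strip()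
--     return None
-- ===== SOURCE B (Python) =====
-- def _pick_logo_url(logos):
--     if not logos or not isinstance(logos, list):
--         return None
--     best = None  # (rank, media): rank 0 = "Logo", 1 = "Big Logo"; earliest minimal rank wins
--     for entry in logos:
--         if isinstance(entry, dict):
--             media = entry.get("mediaId")
--             if media:
--                 t = entry.get("logoType")
--                 rank = 0 if t == "Logo" else (1 if t == "Big Logo" else None)
--                 if rank is not None and (best is None or rank < best[0]):
--                     best = (rank, media)
--     if best is not None:
--         return str(best[1]).strip()
--     first = logos[0]
--     if isinstance(first, dict) and first.get("mediaId"):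
--         return str(first["mediaId"]).strip()
--     return None
-- ===== Notes on version B (the rewrite author's own statement) =====
-- stated objective: alternative
-- what changed: Replaces A's two full scans (one per preferred logoType) by a single pass that keeps the earliest entry of minimal preference rank (0 for 'Logo', 1 for 'Big Logo') among entries with a truthy mediaId, then strips the kept mediaId; guard and first-element fallback kept.
import Mathlib
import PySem

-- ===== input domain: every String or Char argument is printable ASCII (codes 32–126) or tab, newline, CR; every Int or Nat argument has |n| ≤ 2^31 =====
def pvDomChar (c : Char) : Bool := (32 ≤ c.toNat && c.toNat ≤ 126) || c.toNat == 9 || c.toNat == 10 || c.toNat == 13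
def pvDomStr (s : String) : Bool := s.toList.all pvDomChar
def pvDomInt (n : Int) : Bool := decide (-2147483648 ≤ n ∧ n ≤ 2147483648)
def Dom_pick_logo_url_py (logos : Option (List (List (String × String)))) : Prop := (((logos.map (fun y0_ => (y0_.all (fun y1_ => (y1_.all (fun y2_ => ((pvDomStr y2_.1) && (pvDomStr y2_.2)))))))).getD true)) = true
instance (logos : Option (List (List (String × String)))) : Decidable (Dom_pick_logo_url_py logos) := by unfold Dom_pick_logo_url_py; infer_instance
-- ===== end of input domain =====

-- B replaces A's two full scans (one per preferred logoType) by a single accumulator pass that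
-- keeps the earliest entry of minimal preference rank (0 = "Logo", 1 = "Big Logo") with a truthy
-- mediaId; guard and first-element fallback kept (alternative decomposition, same cost).

-- ===== PORT A =====
-- first-match lookup on an association list = Python dict .get on these inputs
def pvGet : List (String × String) → String → Option String
  | [], _ => none
  | (k, v) :: rest, key => if k == key then some v else pvGet rest key

-- Python truthiness of entry.get("mediaId")
def pvTruthy : Option String → Bool
  | some s => !(s == "")
  | none => false

-- inner 'for entry in logos' loop for one preferred type
def pvFindA (pref : String) : List (List (String × String)) → Option String
  | [] => none
  | e :: rest =>
    if (pvGet e "logoType" == some pref) && pvTruthy (pvGet e "mediaId") then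
      some (PySem.Str.strip ((pvGet e "mediaId").getD ""))
    else pvFindA pref rest

-- outer 'for preferred in ("Logo", "Big Logo")' loop
def pvOuterA (l : List (List (String × String))) : List String → Option String
  | [] => none
  | p :: ps =>
    match pvFindA p l with
    | some r => some r
    | none => pvOuterA l ps

def pick_logo_url_py (logos : Option (List (List (String × String)))) : Option String :=
  match logos with
  | none => none
  | some [] => none
  | some (e :: rest) =>
    match pvOuterA (e :: rest) ["Logo", "Big Logo"] with
    | some r => some r
    | none =>
      if pvTruthy (pvGet e "mediaId") then
        some (PySem.Str.strip ((pvGet e "mediaId").getD ""))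
      else none

-- ===== PORT B =====
-- rank = 0 if t == "Logo" else (1 if t == "Big Logo" else None)
def pvRank (t : Option String) : Option Nat :=
  if t = some "Logo" then some 0 else if t = some "Big Logo" then some 1 else none

-- the candidate an entry contributes: its (rank, media) if mediaId is truthy and the type is ranked
def pvCand (e : List (String × String)) : Option (Nat × String) :=
  match List.lookup "mediaId" e with
  | some m =>
    if m ≠ "" then
      match pvRank (List.lookup "logoType" e) with
      | some r => some (r, m)
      | none => none
    else none
  | none => none

-- the 'for entry in logos' accumulator loop: best := entry's candidate if strictly better
def pvScan : List (List (String × String)) → Option (Nat × String) → Option (Nat × String)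
  | [], best => best
  | e :: rest, best =>
    pvScan rest
      (match pvCand e, best with
       | none, b => b
       | some c, none => some c
       | some (r, m), some (br, bm) => if r < br then some (r, m) else some (br, bm))

def pick_logo_url_py_alt (logos : Option (List (List (String × String)))) : Option String :=
  match logos with
  | none => none
  | some [] => none
  | some (first :: tl) =>
    match pvScan (first :: tl) none with
    | some (_, m) => some (PySem.Str.strip m)
    | none =>
      match List.lookup "mediaId" first with
      | some m => if m ≠ "" then some (PySem.Str.strip m) else none
      | none => none

-- ===== PRECONDITION & SPEC =====
def Spec_pick_logo_url_py (logos : Option (List (List (String × String)))) (out : Option String) : Prop := out = pick_logo_url_py_alt logos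
instance (logos : Option (List (List (String × String)))) (out : Option String) : Decidable (Spec_pick_logo_url_py logos out) := by unfold Spec_pick_logo_url_py; infer_instance

-- ===== CLAIM (what is proved, stated in full; the proofs are below) =====
def Claim_equal_pick_logo_url_py : Prop := ∀ (logos : Option (List (List (String × String)))), Dom_pick_logo_url_py logos → Spec_pick_logo_url_py logos (pick_logo_url_py logos)

-- ===== LEMMAS AND PROOFS =====

-- pvGet is List.lookup with arguments swapped
theorem pvGet_eq_lookup (e : List (String × String)) (k : String) :
    pvGet e k = List.lookup k e := by
  induction e with
  | nil => rfl
  | cons p rest ih =>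
    obtain ⟨a, v⟩ := p
    simp only [pvGet, List.lookup]
    by_cases h : a = k
    · simp [h]
    · have h1 : (a == k) = false := by simpa using h
      have h2 : (k == a) = false := by simpa using fun hh => h hh.symm
      simp [h1, h2, ih]

-- first truthy mediaId whose logoType equals p (unstripped)
def pvFirst (p : String) : List (List (String × String)) → Option String
  | [] => none
  | e :: rest =>
    if (pvGet e "logoType" == some p) && pvTruthy (pvGet e "mediaId") then pvGet e "mediaId"
    else pvFirst p rest

theorem pvFindA_eq (p : String) (l : List (List (String × String))) :
    pvFindA p l = (pvFirst p l).map PySem.Str.strip := by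
  induction l with
  | nil => rfl
  | cons e rest ih =>
    simp only [pvFindA, pvFirst]
    by_cases h : ((pvGet e "logoType" == some p) && pvTruthy (pvGet e "mediaId")) = true
    · simp only [h, if_true]
      cases hm : pvGet e "mediaId" with
      | none => rw [hm] at h; simp [pvTruthy] at h
      | some m => simp
    · simp only [Bool.not_eq_true] at h
      simp [h, ih]

-- min with ties to the left, the step of pvScan
def pvMerge (a b : Option (Nat × String)) : Option (Nat × String) :=
  match a, b with
  | none, b => b
  | some x, none => some x
  | some (ar, am), some (br, bm) => if br < ar then some (br, bm) else some (ar, am)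

theorem pvMerge_assoc (a b c : Option (Nat × String)) :
    pvMerge (pvMerge a b) c = pvMerge a (pvMerge b c) := by
  cases a with
  | none => rfl
  | some x =>
    obtain ⟨ar, am⟩ := x
    cases b with
    | none => rfl
    | some y =>
      obtain ⟨br, bm⟩ := y
      cases c with
      | none => simp only [pvMerge]; split_ifs <;> rfl
      | some z =>
        obtain ⟨cr, cm⟩ := z
        by_cases h1 : br < ar <;> by_cases h2 : cr < br <;> by_cases h3 : cr < ar <;>
          simp only [pvMerge, h1, h2, h3, if_true, if_false] <;>
          first | rfl | (exfalso; omega)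

theorem pvScan_merge (l : List (List (String × String))) (best : Option (Nat × String)) :
    pvScan l best = pvMerge best (pvScan l none) := by
  induction l generalizing best with
  | nil => cases best <;> rfl
  | cons e rest ih =>
    simp only [pvScan]
    rw [ih, ih (match pvCand e, none with
       | none, b => b
       | some c, none => some c
       | some (r, m), some (br, bm) => if r < br then some (r, m) else some (br, bm))]
    have hstep : ∀ (b : Option (Nat × String)),
        (match pvCand e, b with
         | none, b => b
         | some c, none => some c
         | some (r, m), some (br, bm) => if r < br then some (r, m) else some (br, bm))
        = pvMerge b (pvCand e) := by
      intro b
      cases hc : pvCand e with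
      | none => cases b <;> rfl
      | some c =>
        obtain ⟨r, m⟩ := c
        cases b with
        | none => rfl
        | some x => obtain ⟨br, bm⟩ := x; rfl
    rw [hstep, hstep, pvMerge_assoc]
    rfl

-- pvScan from none computes: first "Logo" candidate, else first "Big Logo" candidate
theorem pvScan_none (l : List (List (String × String))) :
    pvScan l none =
      match pvFirst "Logo" l with
      | some m => some (0, m)
      | none =>
        match pvFirst "Big Logo" l with
        | some m => some (1, m)
        | none => none := by
  induction l with
  | nil => rfl
  | cons e rest ih =>
    have hc : pvScan (e :: rest) none = pvMerge (pvCand e) (pvScan rest none) := by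
      simp only [pvScan]
      rw [pvScan_merge]
      cases hce : pvCand e with
      | none => rfl
      | some c => obtain ⟨r, m⟩ := c; rfl
    rw [hc, ih]
    simp only [pvFirst, ← pvGet_eq_lookup] at *
    cases hm : pvGet e "mediaId" with
    | none =>
      have hcand : pvCand e = none := by
        simp [pvCand, ← pvGet_eq_lookup, hm]
      simp [hcand, pvTruthy, pvMerge]
    | some m =>
      by_cases hz : m = ""
      · have hcand : pvCand e = none := by
          simp [pvCand, ← pvGet_eq_lookup, hm, hz]
        have ht : pvTruthy (some m) = false := by simp [pvTruthy, hz]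
        simp [hcand, ht, pvMerge]
      · have ht : pvTruthy (some m) = true := by simp [pvTruthy, hz]
        cases hlt : pvGet e "logoType" with
        | none =>
          have hcand : pvCand e = none := by
            simp [pvCand, ← pvGet_eq_lookup, hm, hz, pvRank, hlt]
          simp [hcand, hlt, pvMerge]
        | some t =>
          by_cases h0 : t = "Logo"
          · have hcand : pvCand e = some (0, m) := by
              simp [pvCand, ← pvGet_eq_lookup, hm, hz, pvRank, hlt, h0]
            subst h0
            simp only [hcand, hlt, ht, Bool.and_true, beq_self_eq_true, if_true]
            cases pvFirst "Logo" rest <;> cases pvFirst "Big Logo" rest <;> simp [pvMerge, hm]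
          · by_cases h1 : t = "Big Logo"
            · have hcand : pvCand e = some (1, m) := by
                simp [pvCand, ← pvGet_eq_lookup, hm, hz, pvRank, hlt, h0, h1]
              subst h1
              have e0 : ((some "Big Logo" == some "Logo") = false) := by decide
              have e1 : ((some "Big Logo" == some "Big Logo") = true) := by decide
              simp only [hcand, hlt, ht, Bool.and_true, e0, e1, if_false, if_true]
              cases pvFirst "Logo" rest <;> cases pvFirst "Big Logo" rest <;> simp [pvMerge, hm]
            · have hcand : pvCand e = none := by
                simp [pvCand, ← pvGet_eq_lookup, hm, hz, pvRank, hlt, h0, h1]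
              have e0 : ((some t == some "Logo") = false) := by simpa using h0
              have e1 : ((some t == some "Big Logo") = false) := by simpa using h1
              simp [hcand, hlt, e0, e1, pvMerge]

-- ===== VERDICT (by name: the statement is the Claim_ definition above) =====
theorem pick_logo_url_py_spec : Claim_equal_pick_logo_url_py := by
  intro logos _
  unfold Spec_pick_logo_url_py
  cases logos with
  | none => rfl
  | some l =>
    cases l with
    | nil => rfl
    | cons e rest =>
      simp only [pick_logo_url_py, pick_logo_url_py_alt, pvScan_none]
      have houter : pvOuterA (e :: rest) ["Logo", "Big Logo"] =
          match pvFirst "Logo" (e :: rest) with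
          | some m => some (PySem.Str.strip m)
          | none => (pvFirst "Big Logo" (e :: rest)).map PySem.Str.strip := by
        simp only [pvOuterA, pvFindA_eq]
        cases pvFirst "Logo" (e :: rest) <;> cases pvFirst "Big Logo" (e :: rest) <;> rfl
      rw [houter]
      rw [← pvGet_eq_lookup]
      cases pvFirst "Logo" (e :: rest) with
      | some m => simp
      | none =>
        cases pvFirst "Big Logo" (e :: rest) with
        | some m => simp
        | none =>
          simp only [Option.map_none]
          cases hm : pvGet e "mediaId" with
          | none => simp [pvTruthy]
          | some m =>
            by_cases hz : m = "" <;> simp [pvTruthy, hz]
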